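-- pv_equiv track=rewrite | github.com/elisa-negrini/SkiPoseEstimation-SPORTTECH | SkiPoserepo/k_fold_split.py | dictionary_split
-- ===== SOURCE A (Python) =====
-- def dictionary_split(dictionary, start_index, end_index):
--     """
--     Extracts two dictionaries: one with elements between the specified indices and the other with the remaining elements.
--
--     Args:
--         dictionary (dict): The original dictionary.
--         start_index (int): The starting index of extraction.
--         end_index (int): The ending index of extraction (inclusive).
--
--     Returns:
--         dict, dict: Two dictionaries, one extracted and one remaining.
--     """
--     test_dictionary = {}
--     remaining_dictionary = {}
--     keys = list(dictionary.keys())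
--
--     for index, key in enumerate(keys):
--         if start_index <= index <= end_index:
--             test_dictionary[key] = dictionary[key]
--         else:
--             remaining_dictionary[key] = dictionary[key]
--
--     return test_dictionary, remaining_dictionary
-- ===== SOURCE B (Python) =====
-- def dictionary_split(dictionary, start_index, end_index):
--     items = list(dictionary.items())
--     lo = max(start_index, 0)
--     hi = min(end_index, len(items) - 1)
--     if lo > hi:
--         return {}, dict(items)
--     return dict(items[lo:hi + 1]), dict(items[:lo] + items[hi + 1:])
-- ===== Notes on version B (the rewrite author's own statement) =====
-- stated objective: alternative
-- what changed: Replaced the per-element enumerate loop with index-range comparisons by clamping the range once (lo = max(start,0), hi = min(end,len-1)) and partitioning the items list with three contiguous slices.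
import Mathlib
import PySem

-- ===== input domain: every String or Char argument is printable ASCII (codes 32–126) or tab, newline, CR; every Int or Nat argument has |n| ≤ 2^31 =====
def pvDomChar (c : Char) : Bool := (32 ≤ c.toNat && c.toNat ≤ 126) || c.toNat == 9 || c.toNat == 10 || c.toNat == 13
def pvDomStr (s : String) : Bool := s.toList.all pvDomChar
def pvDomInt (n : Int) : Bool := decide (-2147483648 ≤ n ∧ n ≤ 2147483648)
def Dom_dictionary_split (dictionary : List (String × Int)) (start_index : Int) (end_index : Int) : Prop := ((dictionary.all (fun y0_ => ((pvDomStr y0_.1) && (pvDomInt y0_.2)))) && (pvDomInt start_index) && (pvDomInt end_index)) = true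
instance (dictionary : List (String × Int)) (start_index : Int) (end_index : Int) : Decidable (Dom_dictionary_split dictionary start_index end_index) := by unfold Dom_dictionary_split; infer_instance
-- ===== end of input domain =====

-- ===== PORT A =====
-- A: iterate the dict's entries with their positions; in a Python dict every key occurs once
-- and maps to its entry's value, so dictionary[key] is the entry's value and each dict
-- assignment appends a fresh pair (exact for the association lists produced from dicts).
def dictionary_split (dictionary : List (String × Int)) (start_index : Int) (end_index : Int) : (List (String × Int)) × (List (String × Int)) :=
  (PySem.List.enumerate dictionary 0).foldl
    (fun acc p =>
      if start_index ≤ p.1 ∧ p.1 ≤ end_index then (acc.1 ++ [p.2], acc.2)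
      else (acc.1, acc.2 ++ [p.2]))
    ([], [])

-- ===== PORT B =====
-- B: clamp the requested range once and partition by three contiguous slices.
def dictionary_split_alt (dictionary : List (String × Int)) (start_index : Int) (end_index : Int) : (List (String × Int)) × (List (String × Int)) :=
  let items := dictionary
  let lo := max start_index 0
  let hi := min end_index ((items.length : Int) - 1)
  if lo > hi then ([], items)
  else (PySem.List.slice items (some lo) (some (hi + 1)),
        PySem.List.slice items none (some lo) ++ PySem.List.slice items (some (hi + 1)) none)

-- ===== PRECONDITION & SPEC =====
def Spec_dictionary_split (dictionary : List (String × Int)) (start_index : Int) (end_index : Int) (out : (List (String × Int)) × (List (String × Int))) : Prop := out = dictionary_split_alt dictionary start_index end_index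
instance (dictionary : List (String × Int)) (start_index : Int) (end_index : Int) (out : (List (String × Int)) × (List (String × Int))) : Decidable (Spec_dictionary_split dictionary start_index end_index out) := by unfold Spec_dictionary_split; infer_instance

-- ===== CLAIM (what is proved, stated in full; the proofs are below) =====
def Claim_equal_dictionary_split : Prop := ∀ (dictionary : List (String × Int)) (start_index : Int) (end_index : Int), Dom_dictionary_split dictionary start_index end_index → Spec_dictionary_split dictionary start_index end_index (dictionary_split dictionary start_index end_index)

-- ===== LEMMAS AND PROOFS =====

-- ===== VERDICT (by name: the statement is the Claim_ definition above) =====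
-- loop shape of A: the pair-state fold is the two filters of the enumerated list
lemma foldl_pair_partition (P : Int × (String × Int) → Prop) [DecidablePred P] :
    ∀ (l : List (Int × (String × Int))) (acc : List (String × Int) × List (String × Int)),
      l.foldl (fun a x => if P x then (a.1 ++ [x.2], a.2) else (a.1, a.2 ++ [x.2])) acc
        = (acc.1 ++ (l.filter (fun x => decide (P x))).map (·.2),
           acc.2 ++ (l.filter (fun x => !decide (P x))).map (·.2)) := by
  intro l
  induction l with
  | nil => simp
  | cons x xs ih =>
      intro acc
      by_cases h : P x <;> simp [h, ih]

-- index-interval filters of an enumerated list are contiguous slices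
lemma enum_filter_seg (d : List (String × Int)) (P : Int → Prop) [DecidablePred P]
    (a b : Nat) (hab : a ≤ b) (hbn : b ≤ d.length)
    (hiff : ∀ i : Int, 0 ≤ i → i < d.length → (P i ↔ ((a : Int) ≤ i ∧ i < (b : Int)))) :
    ((PySem.List.enumerate d 0).filter (fun x => decide (P x.1))).map (·.2)
        = (d.drop a).take (b - a)
      ∧ ((PySem.List.enumerate d 0).filter (fun x => !decide (P x.1))).map (·.2)
        = d.take a ++ d.drop b := by
  have hd : d = d.take a ++ ((d.drop a).take (b - a) ++ (d.drop a).drop (b - a)) := by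
    simp
  have hdrop : (d.drop a).drop (b - a) = d.drop b := by
    rw [List.drop_drop]; congr 1; omega
  have hlen1 : (d.take a).length = a := by
    simp; omega
  have hlen2 : ((d.drop a).take (b - a)).length = b - a := by
    simp; omega
  have h1 : ∀ p ∈ PySem.List.enumerate (d.take a) 0, ¬ P p.1 := by
    intro p hp
    rw [PySem.List.mem_enumerate_iff] at hp
    obtain ⟨k, hk, rfl⟩ := hp
    have hk' : k < a := by simpa [hlen1] using hk
    intro hP
    have := (hiff _ (by omega) (by push_cast; omega)).mp hP
    omega
  have h2 : ∀ p ∈ PySem.List.enumerate ((d.drop a).take (b - a)) (a : Int), P p.1 := by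
    intro p hp
    rw [PySem.List.mem_enumerate_iff] at hp
    obtain ⟨k, hk, rfl⟩ := hp
    have hk' : k < b - a := by simpa [hlen2] using hk
    exact (hiff _ (by omega) (by push_cast; omega)).mpr (by constructor <;> push_cast <;> omega)
  have h3 : ∀ p ∈ PySem.List.enumerate (d.drop b) ((a : Int) + (b - a : Nat)), ¬ P p.1 := by
    intro p hp
    rw [PySem.List.mem_enumerate_iff] at hp
    obtain ⟨k, hk, rfl⟩ := hp
    have hk' : k < d.length - b := by simpa using hk
    intro hP
    have := (hiff _ (by push_cast; omega) (by push_cast; omega)).mp hP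
    push_cast at this; omega
  constructor
  · conv_lhs => rw [hd, hdrop]
    rw [PySem.List.enumerate_append, PySem.List.enumerate_append]
    rw [List.filter_append, List.filter_append]
    rw [List.filter_eq_nil_iff.mpr (by intro p hp; simpa using h1 p hp)]
    rw [List.filter_eq_self.mpr (by intro p hp; simpa [hlen1] using h2 p (by simpa [hlen1] using hp))]
    rw [List.filter_eq_nil_iff.mpr (by
      intro p hp
      simp only [hlen1, hlen2] at hp
      simpa using h3 p (by simpa using hp))]
    simp [PySem.List.map_snd_enumerate]
  · conv_lhs => rw [hd, hdrop]
    rw [PySem.List.enumerate_append, PySem.List.enumerate_append]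
    rw [List.filter_append, List.filter_append]
    rw [List.filter_eq_self.mpr (by intro p hp; simpa using h1 p hp)]
    rw [List.filter_eq_nil_iff.mpr (by
      intro p hp
      simp only [hlen1] at hp
      simpa using h2 p (by simpa [hlen1] using hp))]
    rw [List.filter_eq_self.mpr (by
      intro p hp
      simp only [hlen1, hlen2] at hp
      simpa using h3 p (by simpa using hp))]
    simp [PySem.List.map_snd_enumerate]

-- ===== VERDICT (by name: the statement is the Claim_ definition above) =====
theorem dictionary_split_spec : Claim_equal_dictionary_split := by
  intro d s e _
  unfold Spec_dictionary_split dictionary_split dictionary_split_alt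
  rw [foldl_pair_partition (fun x => s ≤ x.1 ∧ x.1 ≤ e) (PySem.List.enumerate d 0) ([], [])]
  simp only [List.nil_append]
  by_cases h : max s 0 > min e ((d.length : Int) - 1)
  · have := enum_filter_seg d (fun i => s ≤ i ∧ i ≤ e) 0 0 le_rfl (Nat.zero_le _)
      (by intro i h0 hn; constructor
          · intro ⟨h1, h2⟩; exfalso; omega
          · intro ⟨h1, h2⟩; exfalso; omega)
    simp only [if_pos h]
    rw [this.1, this.2]
    simp
  · rw [not_lt] at h
    have hlo : (0 : Int) ≤ max s 0 := le_max_right s 0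
    have hhi : (0 : Int) ≤ min e ((d.length : Int) - 1) + 1 := by omega
    have hseg := enum_filter_seg d (fun i => s ≤ i ∧ i ≤ e)
      (max s 0).toNat (min e ((d.length : Int) - 1) + 1).toNat
      (by omega) (by omega)
      (by intro i h0 hn; dsimp only; omega)
    simp only [if_neg (by omega : ¬ max s 0 > min e ((d.length : Int) - 1))]
    rw [hseg.1, hseg.2]
    rw [PySem.List.slice_toNat _ hlo hhi, PySem.List.slice_to _ hlo, PySem.List.slice_from _ hhi]
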